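-- pv_equiv track=rewrite | github.com/DucHai972/Q_Benchmark | generate_healthcare_answer_reverse_lookup.py | decode_mcq_answer
-- ===== SOURCE A (Python) =====
-- def decode_mcq_answer(feature, coded_answer, questions_schema):
--     """Decode MCQ answer from letter code to human-readable text."""
--     if feature not in questions_schema:
--         return str(coded_answer)
--
--     question_text = questions_schema[feature]
--
--     if '[MCQ:' not in question_text:
--         return str(coded_answer)
--
--     # Extract MCQ options
--     mcq_part = question_text.split('[MCQ:')[1].split(']')[0]
--     options = {}
--
--     # Parse options like "A. Female B. Male"
--     parts = mcq_part.strip().split()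
--     current_key = None
--     current_value = []
--
--     for part in parts:
--         if len(part) == 2 and part[1] == '.':
--             if current_key:
--                 options[current_key] = ' '.join(current_value)
--             current_key = part[0]
--             current_value = []
--         else:
--             current_value.append(part)
--
--     if current_key:
--         options[current_key] = ' '.join(current_value)
--
--     return options.get(coded_answer, coded_answer)
-- ===== SOURCE B (Python) =====
-- def decode_mcq_answer(feature, coded_answer, questions_schema):
--     """Decode MCQ answer: single backward pass over the option tokens, no dict built."""
--     if feature not in questions_schema:
--         return str(coded_answer)
--     question_text = questions_schema[feature]
--     if '[MCQ:' not in question_text: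
--         return str(coded_answer)
--     mcq_part = question_text.split('[MCQ:')[1].split(']')[0]
--     found = None
--     group = []
--     for tok in reversed(mcq_part.strip().split()):
--         if len(tok) == 2 and tok[1] == '.':
--             if found is None and tok[0] == coded_answer:
--                 found = ' '.join(group)
--             group = []
--         else:
--             group = [tok] + group
--     return coded_answer if found is None else found
-- ===== Notes on version B (the rewrite author's own statement) =====
-- stated objective: alternative
-- what changed: Replaces the forward accumulator loop that builds an options dict and then looks up the coded answer by a single backward pass over the tokens that binds the answer at the last matching key and never builds a dict.
import Mathlib
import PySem

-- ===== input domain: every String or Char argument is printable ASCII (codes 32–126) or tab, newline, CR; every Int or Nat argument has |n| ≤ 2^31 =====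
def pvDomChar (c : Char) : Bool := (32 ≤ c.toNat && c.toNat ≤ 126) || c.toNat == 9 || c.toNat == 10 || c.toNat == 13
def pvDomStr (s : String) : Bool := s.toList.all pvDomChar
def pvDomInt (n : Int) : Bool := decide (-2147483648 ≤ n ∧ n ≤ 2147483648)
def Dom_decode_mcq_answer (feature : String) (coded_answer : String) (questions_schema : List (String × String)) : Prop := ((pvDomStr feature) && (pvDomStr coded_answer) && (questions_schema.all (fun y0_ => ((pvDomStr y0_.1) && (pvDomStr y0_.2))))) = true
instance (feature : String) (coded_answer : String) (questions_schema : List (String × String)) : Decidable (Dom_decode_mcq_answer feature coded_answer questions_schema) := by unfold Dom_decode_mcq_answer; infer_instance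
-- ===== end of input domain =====

-- B replaces A's forward dict-building accumulator loop by one backward pass that binds
-- the answer at the last matching key (alternative decomposition; same cost, no dict).

-- ===== PORT A =====
-- shared token tests ('len(part) == 2 and part[1] == "."' and 'part[0]')
def pvIsKeyTok (part : String) : Bool :=
  PySem.Str.len part == 2 && (PySem.Str.pyGet? part 1 == some '.')

-- part[0] as a one-character string; the index is in range wherever A/B use it (len part = 2)
def pvKeyOf (part : String) : String :=
  match PySem.Str.pyGet? part 0 with
  | some c => String.ofList [c]
  | none => ""

-- 'options[current_key] = " ".join(current_value)' guarded by 'if current_key:'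
def pvFlush (options : PySem.Dict String String) (ck : Option String) (cv : List String) :
    PySem.Dict String String :=
  match ck with
  | some k => options.insert k (PySem.Str.join " " cv)
  | none => options

-- loop body of A over (options, current_key, current_value)
def pvStepA (st : PySem.Dict String String × Option String × List String) (part : String) :
    PySem.Dict String String × Option String × List String :=
  if pvIsKeyTok part then (pvFlush st.1 st.2.1 st.2.2, some (pvKeyOf part), [])
  else (st.1, st.2.1, st.2.2 ++ [part])

-- "question_text.split('[MCQ:')[1].split(']')[0]"; both indices are in range when '[MCQ:' occurs
def pvMcqPart (question_text : String) : String :=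
  (PySem.Str.split? ((PySem.Str.split? question_text "[MCQ:").getD [] |>.getD 1 "") "]").getD [] |>.getD 0 ""

def decode_mcq_answer (feature : String) (coded_answer : String) (questions_schema : List (String × String)) : String :=
  let schema := PySem.Dict.ofList questions_schema
  if schema.contains feature = false then coded_answer
  else
    let question_text := (schema.get? feature).getD ""
    if PySem.Str.isIn "[MCQ:" question_text = false then coded_answer
    else
      let parts := PySem.Str.split₀ (PySem.Str.strip (pvMcqPart question_text))
      let st := parts.foldl pvStepA (PySem.Dict.empty, none, [])
      (pvFlush st.1 st.2.1 st.2.2).getD coded_answer coded_answer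

-- ===== PORT B =====
-- loop body of B over (found, group), tokens visited in reverse
def pvStepB (coded : String) (st : Option String × List String) (tok : String) :
    Option String × List String :=
  if pvIsKeyTok tok then
    (if st.1.isNone && (pvKeyOf tok == coded) then some (PySem.Str.join " " st.2) else st.1, [])
  else (st.1, tok :: st.2)

def decode_mcq_answer_alt (feature : String) (coded_answer : String) (questions_schema : List (String × String)) : String :=
  let schema := PySem.Dict.ofList questions_schema
  if schema.contains feature = false then coded_answer
  else
    let question_text := (schema.get? feature).getD ""
    if PySem.Str.isIn "[MCQ:" question_text = false then coded_answer
    else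
      let toks := PySem.Str.split₀ (PySem.Str.strip (pvMcqPart question_text))
      let r := toks.reverse.foldl (pvStepB coded_answer) (none, [])
      r.1.getD coded_answer

-- ===== PRECONDITION & SPEC =====
def Spec_decode_mcq_answer (feature : String) (coded_answer : String) (questions_schema : List (String × String)) (out : String) : Prop := out = decode_mcq_answer_alt feature coded_answer questions_schema
instance (feature : String) (coded_answer : String) (questions_schema : List (String × String)) (out : String) : Decidable (Spec_decode_mcq_answer feature coded_answer questions_schema out) := by unfold Spec_decode_mcq_answer; infer_instance

-- ===== CLAIM (what is proved, stated in full; the proofs are below) =====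
def Claim_equal_decode_mcq_answer : Prop := ∀ (feature : String) (coded_answer : String) (questions_schema : List (String × String)), Dom_decode_mcq_answer feature coded_answer questions_schema → Spec_decode_mcq_answer feature coded_answer questions_schema (decode_mcq_answer feature coded_answer questions_schema)

-- ===== LEMMAS AND PROOFS =====

-- the core invariant: A's forward fold + final flush + dict lookup equals B's backward
-- scan, relative to any pending A-state (d, ck, cv); the backward scan's group component
-- collects the leading non-key tokens of the suffix, which A would append to cv before
-- flushing ck.
theorem pvCore (coded : String) (toks : List String) :
    ∀ (d : PySem.Dict String String) (ck : Option String) (cv : List String),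
      (pvFlush (toks.foldl pvStepA (d, ck, cv)).1
               (toks.foldl pvStepA (d, ck, cv)).2.1
               (toks.foldl pvStepA (d, ck, cv)).2.2).getD coded coded
      =
      (match (toks.foldr (fun tok st => pvStepB coded st tok) (none, [])).1 with
       | some v => v
       | none =>
         (pvFlush d ck (cv ++ (toks.foldr (fun tok st => pvStepB coded st tok) (none, [])).2)).getD
           coded coded) := by
  induction toks with
  | nil => intro d ck cv; simp
  | cons t ts ih =>
    intro d ck cv
    simp only [List.foldl_cons, List.foldr_cons]
    rcases hFG : ts.foldr (fun tok st => pvStepB coded st tok) (none, []) with ⟨f, g⟩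
    by_cases hk : pvIsKeyTok t = true
    · have hA : pvStepA (d, ck, cv) t = (pvFlush d ck cv, some (pvKeyOf t), []) := by
        simp only [pvStepA, if_pos hk]
      rw [hA, ih, hFG]
      rcases f with _ | v
      · by_cases hc : (pvKeyOf t == coded) = true
        · have hB : pvStepB coded (none, g) t = (some (PySem.Str.join " " g), []) := by
            simp only [pvStepB, if_pos hk, Option.isNone_none, Bool.true_and, hc, if_true]
          rw [hB]
          have hcq : coded = pvKeyOf t := (beq_iff_eq.mp hc).symm
          simp only [pvFlush, List.nil_append]
          rw [hcq, PySem.Dict.getD_insert_self]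
        · have hB : pvStepB coded (none, g) t = (none, []) := by
            simp only [pvStepB, if_pos hk, Option.isNone_none, Bool.true_and,
              Bool.not_eq_true] at *
            simp [hc]
          rw [hB]
          have hne : coded ≠ pvKeyOf t := fun h => hc (beq_iff_eq.mpr h.symm)
          simp only [pvFlush, List.nil_append, List.append_nil]
          rw [PySem.Dict.getD_insert_of_ne _ _ _ hne]
      · have hB : pvStepB coded (some v, g) t = (some v, []) := by
          simp [pvStepB, hk]
        rw [hB]
    · have hA : pvStepA (d, ck, cv) t = (d, ck, cv ++ [t]) := by
        simp only [pvStepA, if_neg hk]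
      have hB : pvStepB coded (f, g) t = (f, t :: g) := by
        simp only [pvStepB, if_neg hk]
      rw [hA, ih, hFG, hB]
      rcases f with _ | v
      · simp
      · rfl

-- ===== VERDICT (by name: the statement is the Claim_ definition above) =====
theorem decode_mcq_answer_spec : Claim_equal_decode_mcq_answer := by
  intro feature coded_answer questions_schema _
  unfold Spec_decode_mcq_answer decode_mcq_answer decode_mcq_answer_alt
  simp only []
  by_cases h1 : (PySem.Dict.ofList questions_schema).contains feature = false
  · rw [if_pos h1, if_pos h1]
  · rw [if_neg h1, if_neg h1]
    by_cases h2 : PySem.Str.isIn "[MCQ:"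
        (((PySem.Dict.ofList questions_schema).get? feature).getD "") = false
    · rw [if_pos h2, if_pos h2]
    · rw [if_neg h2, if_neg h2]
      rw [List.foldl_reverse]
      rw [pvCore coded_answer
        (PySem.Str.split₀ (PySem.Str.strip (pvMcqPart
          (((PySem.Dict.ofList questions_schema).get? feature).getD ""))))
        PySem.Dict.empty none []]
      rcases (List.foldr _ ((none : Option String), ([] : List String)) _) with ⟨_ | v, g⟩
      · simp [pvFlush, PySem.Dict.getD_empty]
      · rfl
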